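-- pv_equiv track=rewrite | github.com/ayushajain/Drone | test/flashroi.py | cyclic_equivalence
-- ===== SOURCE A (Python) =====
-- def cyclic_equivalence(a, b):
--     """ Algorithm of cyclic equivalence used to determine whether 2 lists are rotated versions of each other
--
--     Args:
--         a:
--         b:
--
--     Returns:
--
--     """
--
--     n, i, j = len(a), 0, 0
--     if n != len(b):
--         return False
--     while i < n and j < n:
--         k = 1
--         while k <= n and a[(i + k) % n] == b[(j + k) % n]:
--             k += 1
--         if k > n:
--             return True
--         if a[(i + k) % n] > b[(j + k) % n]:
--             i += k
--         else:
--             j += k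
--     return False
-- ===== SOURCE B (Python) =====
-- def cyclic_equivalence(a, b):
--     n = len(a)
--     if n != len(b):
--         return False
--     return any(b == a[i:] + a[:i] for i in range(n))
-- ===== Notes on version B (the rewrite author's own statement) =====
-- stated objective: simpler
-- what changed: Replaced the two-pointer linear cyclic-equivalence algorithm with a plain brute-force scan over all n rotations (b == a[i:]+a[:i]), a one-liner after the length guard.
import Mathlib
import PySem

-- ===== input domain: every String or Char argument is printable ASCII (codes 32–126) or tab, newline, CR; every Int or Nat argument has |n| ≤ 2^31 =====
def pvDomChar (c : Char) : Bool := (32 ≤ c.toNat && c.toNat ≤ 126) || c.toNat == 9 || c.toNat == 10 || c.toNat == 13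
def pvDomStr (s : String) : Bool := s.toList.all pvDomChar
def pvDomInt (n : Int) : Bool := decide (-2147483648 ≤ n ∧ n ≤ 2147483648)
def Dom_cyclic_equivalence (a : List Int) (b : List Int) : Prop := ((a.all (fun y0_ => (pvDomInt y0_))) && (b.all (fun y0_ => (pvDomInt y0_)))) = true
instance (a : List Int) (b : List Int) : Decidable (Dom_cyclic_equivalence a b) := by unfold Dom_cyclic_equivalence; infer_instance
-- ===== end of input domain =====

-- B replaces the linear two-pointer cyclic-equivalence algorithm by a plain brute-force
-- scan over all n rotations (simpler, not faster).

-- ===== PORT A =====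
-- inner while loop of A: 'while k <= n and a[(i+k)%n] == b[(j+k)%n]: k += 1'; returns final k
def pvInner (n : Nat) (a b : List Int) (i j : Nat) (k : Nat) : Nat :=
  if k ≤ n ∧ a.getD ((i + k) % n) 0 = b.getD ((j + k) % n) 0 then
    pvInner n a b i j (k + 1)
  else k
termination_by n + 1 - k
decreasing_by omega

-- the returned k never shrinks (needed for termination of the outer loop)
theorem pvInner_ge (n : Nat) (a b : List Int) (i j : Nat) (k : Nat) :
    k ≤ pvInner n a b i j k := by
  fun_induction pvInner with
  | case1 _ _ ih => omega
  | case2 => omega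

-- outer while loop of A
def pvOuter (n : Nat) (a b : List Int) (i j : Nat) : Bool :=
  if i < n ∧ j < n then
    let k := pvInner n a b i j 1
    if n < k then true
    else if b.getD ((j + k) % n) 0 < a.getD ((i + k) % n) 0 then
      pvOuter n a b (i + k) j
    else
      pvOuter n a b i (j + k)
  else false
termination_by (n - i) + (n - j)
decreasing_by
  · have := pvInner_ge n a b i j 1; omega
  · have := pvInner_ge n a b i j 1; omega

def cyclic_equivalence (a : List Int) (b : List Int) : Bool :=
  if a.length ≠ b.length then false
  else pvOuter a.length a b 0 0

-- ===== PORT B =====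
def cyclic_equivalence_alt (a : List Int) (b : List Int) : Bool :=
  if a.length ≠ b.length then false
  else (List.range a.length).any (fun i => b == a.drop i ++ a.take i)

-- ===== PRECONDITION & SPEC =====
def Spec_cyclic_equivalence (a : List Int) (b : List Int) (out : Bool) : Prop := out = cyclic_equivalence_alt a b
instance (a : List Int) (b : List Int) (out : Bool) : Decidable (Spec_cyclic_equivalence a b out) := by unfold Spec_cyclic_equivalence; infer_instance

-- ===== CLAIM (what is proved, stated in full; the proofs are below) =====
def Claim_equal_cyclic_equivalence : Prop := ∀ (a : List Int) (b : List Int), Dom_cyclic_equivalence a b → Spec_cyclic_equivalence a b (cyclic_equivalence a b)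

-- ===== LEMMAS AND PROOFS =====

-- the list of all rotations of b
def pvRots (b : List Int) (n : Nat) : List (List Int) := (List.range n).map (fun t => b.rotate t)

theorem pvRots_mem {b : List Int} {n : Nat} (hb : b.length = n) (hpos : 0 < n) (s : Nat) :
    b.rotate s ∈ pvRots b n := by
  have h1 : b.rotate (s % n) = b.rotate s := by rw [← hb]; exact List.rotate_mod b s
  have h2 : s % n < n := Nat.mod_lt _ hpos
  rw [← h1]
  exact List.mem_map.2 ⟨s % n, List.mem_range.2 h2, rfl⟩

-- every nonempty list over a linear order has a minimal member
theorem pvExistsMin (l : List (List Int)) (h : l ≠ []) : ∃ m ∈ l, ∀ x ∈ l, m ≤ x := by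
  induction l with
  | nil => exact absurd rfl h
  | cons hd tl ih =>
    cases tl with
    | nil => exact ⟨hd, List.mem_cons_self, by intro x hx; simp at hx; simp [hx]⟩
    | cons h2 t2 =>
      obtain ⟨m, hm, hle⟩ := ih (by simp)
      rcases le_total hd m with hcmp | hcmp
      · refine ⟨hd, List.mem_cons_self, ?_⟩
        intro x hx
        rcases List.mem_cons.1 hx with rfl | hx
        · exact le_rfl
        · exact le_trans hcmp (hle x hx)
      · refine ⟨m, List.mem_cons_of_mem _ hm, ?_⟩
        intro x hx
        rcases List.mem_cons.1 hx with rfl | hx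
        · exact hcmp
        · exact hle x hx

-- reading an element of a rotation: (l.rotate (r % n)).getD t = l.getD ((t + r) % n)
theorem pvRotGetD {n : Nat} (l : List Int) (hl : l.length = n) (r t : Nat) (ht : t < n) :
    (l.rotate (r % n)).getD t 0 = l.getD ((t + r) % n) 0 := by
  subst hl
  have hpos : 0 < l.length := by omega
  have hlr : (l.rotate (r % l.length)).length = l.length := List.length_rotate l _
  rw [List.getD_eq_getElem _ _ (by omega),
      List.getD_eq_getElem _ _ (Nat.mod_lt _ hpos)]
  rw [List.getElem_rotate l (r % l.length) t (by omega)]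
  congr 1
  rw [Nat.add_mod_mod]

-- first difference strictly larger ⇒ lexicographically larger
theorem pvLexOfFirstDiff : ∀ (t : Nat) (x y : List Int), x.length = y.length → t < x.length →
    (∀ s, s < t → x.getD s 0 = y.getD s 0) → y.getD t 0 < x.getD t 0 → y < x := by
  intro t
  induction t with
  | zero =>
    intro x y hlen ht _ hlt
    match x, y with
    | xh :: xt, yh :: yt =>
      simp only [List.getD_cons_zero] at hlt
      exact List.Lex.rel hlt
  | succ t ih =>
    intro x y hlen ht hpre hlt
    match x, y with
    | xh :: xt, yh :: yt =>
      have hh : xh = yh := by have := hpre 0 (Nat.succ_pos t); simpa using this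
      subst hh
      have : yt < xt := by
        apply ih xt yt (by simpa using hlen) (by simpa using ht)
        · intro s hs; have := hpre (s + 1) (by omega); simpa using this
        · simpa using hlt
      exact List.Lex.cons this

-- every shift t < n is (p+1) % n for some p < n
theorem pvShiftPred {n : Nat} (hpos : 0 < n) (t : Nat) (ht : t < n) :
    ∃ p, p < n ∧ (p + 1) % n = t := by
  by_cases h0 : t = 0
  · exact ⟨n - 1, by omega, by rw [show n - 1 + 1 = n by omega]; simp [h0]⟩
  · exact ⟨t - 1, by omega, by rw [show t - 1 + 1 = t by omega]; exact Nat.mod_eq_of_lt ht⟩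

-- core elimination lemma: after a mismatch a[(i+k)%n] > b[(j+k)%n] with matching
-- elements in between, every rotation of a starting in [i+1, i+k] is strictly larger
-- than some rotation of b
theorem pvKill {n : Nat} {a b : List Int} (ha : a.length = n) (hb : b.length = n)
    (_hpos : 0 < n) {i j k : Nat} (_hk1 : 1 ≤ k) (hkn : k ≤ n)
    (heq : ∀ m, 1 ≤ m → m < k → a.getD ((i + m) % n) 0 = b.getD ((j + m) % n) 0)
    (hgt : b.getD ((j + k) % n) 0 < a.getD ((i + k) % n) 0) :
    ∀ p, i ≤ p → p < i + k →
      b.rotate ((j + (p - i) + 1) % n) < a.rotate ((p + 1) % n) := by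
  intro p hip hpik
  have hdk : p - i < k := by omega
  apply pvLexOfFirstDiff (k - (p - i) - 1)
  · rw [List.length_rotate, List.length_rotate, ha, hb]
  · rw [List.length_rotate, ha]; omega
  · intro s hs
    rw [pvRotGetD a ha (p + 1) s (by omega), pvRotGetD b hb (j + (p - i) + 1) s (by omega)]
    have e1 : (s + (p + 1)) % n = (i + ((p - i) + s + 1)) % n := by congr 1; omega
    have e2 : (s + (j + (p - i) + 1)) % n = (j + ((p - i) + s + 1)) % n := by congr 1; omega
    rw [e1, e2]
    exact heq ((p - i) + s + 1) (by omega) (by omega)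
  · rw [pvRotGetD a ha (p + 1) _ (by omega), pvRotGetD b hb (j + (p - i) + 1) _ (by omega)]
    have e1 : (k - (p - i) - 1 + (p + 1)) % n = (i + k) % n := by congr 1; omega
    have e2 : (k - (p - i) - 1 + (j + (p - i) + 1)) % n = (j + k) % n := by congr 1; omega
    rw [e1, e2]
    exact hgt

-- specification of the inner while loop
theorem pvInner_le (n : Nat) (a b : List Int) (i j : Nat) (k : Nat) (h : k ≤ n + 1) :
    pvInner n a b i j k ≤ n + 1 := by
  fun_induction pvInner with
  | case1 k h' ih => exact ih (by omega)
  | case2 k h' => omega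

theorem pvInner_eq_below (n : Nat) (a b : List Int) (i j : Nat) (k : Nat) :
    ∀ m, k ≤ m → m < pvInner n a b i j k →
      a.getD ((i + m) % n) 0 = b.getD ((j + m) % n) 0 := by
  fun_induction pvInner with
  | case1 k h' ih =>
    intro m hm hlt
    rcases Nat.eq_or_lt_of_le hm with rfl | hm'
    · exact h'.2
    · exact ih m hm' hlt
  | case2 k h' => intro m hm hlt; omega

theorem pvInner_stop (n : Nat) (a b : List Int) (i j : Nat) (k : Nat)
    (h : pvInner n a b i j k ≤ n) :
    a.getD ((i + pvInner n a b i j k) % n) 0 ≠ b.getD ((j + pvInner n a b i j k) % n) 0 := by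
  fun_induction pvInner with
  | case1 k h' ih => exact ih h
  | case2 k h' =>
    intro hc
    exact h' ⟨h, hc⟩

-- invariant of the outer loop: if a and b are cyclically equivalent then the minimal
-- rotation μ still has a starting position ≥ i on the a side and ≥ j on the b side
def pvInv (a b : List Int) (n : Nat) (μ : List Int) (i j : Nat) : Prop :=
  a ~r b →
    (∃ p, i ≤ p ∧ p < n ∧ a.rotate ((p + 1) % n) = μ) ∧
    (∃ q, j ≤ q ∧ q < n ∧ b.rotate ((q + 1) % n) = μ)

theorem pvARotMem {a b : List Int} {n : Nat} (hb : b.length = n) (hpos : 0 < n)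
    (h : a ~r b) (t : Nat) : a.rotate t ∈ pvRots b n := by
  have h0 : a ~r a.rotate t := ⟨t, rfl⟩
  have h1 : b ~r a.rotate t := List.IsRotated.trans h.symm h0
  obtain ⟨s, hs⟩ := h1
  rw [← hs]; exact pvRots_mem hb hpos s

-- main loop lemma: under the invariant, the outer loop returns true iff a ~r b
theorem pvOuter_iff {a b : List Int} {n : Nat} (ha : a.length = n) (hb : b.length = n)
    (hpos : 0 < n) (μ : List Int) (hμle : ∀ x ∈ pvRots b n, μ ≤ x) :
    ∀ M i j, (n - i) + (n - j) ≤ M → pvInv a b n μ i j →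
      (pvOuter n a b i j = true ↔ a ~r b) := by
  intro M
  induction M with
  | zero =>
    intro i j hM hInv
    have hi : ¬ (i < n ∧ j < n) := by omega
    rw [pvOuter, if_neg hi]
    simp only [Bool.false_eq_true, false_iff]
    intro hrot
    obtain ⟨⟨p, hip, hpn, _⟩, _⟩ := hInv hrot
    omega
  | succ M ih =>
    intro i j hM hInv
    by_cases h : i < n ∧ j < n
    · rw [pvOuter, if_pos h]
      set K := pvInner n a b i j 1 with hK
      have hK1 : 1 ≤ K := pvInner_ge n a b i j 1
      have hKle : K ≤ n + 1 := pvInner_le n a b i j 1 (by omega)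
      by_cases hKn : n < K
      · -- all n comparisons matched: the two rotations coincide
        simp only [if_pos hKn, true_iff]
        have hrot : a.rotate ((i + 1) % n) = b.rotate ((j + 1) % n) := by
          apply List.ext_getElem
          · rw [List.length_rotate, List.length_rotate, ha, hb]
          · intro t h1 h2
            have ht : t < n := by rw [List.length_rotate, ha] at h1; omega
            rw [← List.getD_eq_getElem _ 0 h1, ← List.getD_eq_getElem _ 0 h2]
            rw [pvRotGetD a ha (i + 1) t ht, pvRotGetD b hb (j + 1) t ht]
            have e1 : (t + (i + 1)) % n = (i + (t + 1)) % n := by congr 1; omega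
            have e2 : (t + (j + 1)) % n = (j + (t + 1)) % n := by congr 1; omega
            rw [e1, e2]
            exact pvInner_eq_below n a b i j 1 (t + 1) (by omega) (by omega)
        have s1 : a ~r a.rotate ((i + 1) % n) := ⟨(i + 1) % n, rfl⟩
        have s2 : b ~r b.rotate ((j + 1) % n) := ⟨(j + 1) % n, rfl⟩
        rw [hrot] at s1
        exact List.IsRotated.trans s1 s2.symm
      · -- mismatch at position K ≤ n
        simp only [if_neg hKn]
        have hne := pvInner_stop n a b i j 1 (by omega)
        rw [← hK] at hne
        have heqb := pvInner_eq_below n a b i j 1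
        rw [← hK] at heqb
        by_cases hgt : b.getD ((j + K) % n) 0 < a.getD ((i + K) % n) 0
        · rw [if_pos hgt]
          apply ih (i + K) j (by omega)
          -- invariant maintenance: positions p ∈ [i, i+K) cannot carry μ
          intro hrot
          obtain ⟨⟨p, hip, hpn, hpμ⟩, hq⟩ := hInv hrot
          refine ⟨⟨p, ?_, hpn, hpμ⟩, hq⟩
          by_contra hc
          have hkill := pvKill ha hb hpos hK1 (by omega)
            (fun m h1 h2 => heqb m h1 h2) hgt p hip (by omega)
          have hmem : b.rotate ((j + (p - i) + 1) % n) ∈ pvRots b n := pvRots_mem hb hpos _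
          have hlt := lt_of_le_of_lt (hμle _ hmem) hkill
          rw [hpμ] at hlt
          exact lt_irrefl μ hlt
        · rw [if_neg hgt]
          apply ih i (j + K) (by omega)
          intro hrot
          obtain ⟨hp, ⟨q, hjq, hqn, hqμ⟩⟩ := hInv hrot
          refine ⟨hp, ⟨q, ?_, hqn, hqμ⟩⟩
          by_contra hc
          have hgt' : a.getD ((i + K) % n) 0 < b.getD ((j + K) % n) 0 := by
            rcases lt_or_gt_of_ne hne with h' | h'
            · exact h'
            · exact absurd h' hgt
          have hkill := pvKill hb ha hpos hK1 (by omega)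
            (fun m h1 h2 => (heqb m h1 h2).symm) hgt' q hjq (by omega)
          have hmem : a.rotate ((i + (q - j) + 1) % n) ∈ pvRots b n :=
            pvARotMem hb hpos hrot _
          have hlt := lt_of_le_of_lt (hμle _ hmem) hkill
          rw [hqμ] at hlt
          exact lt_irrefl μ hlt
    · rw [pvOuter, if_neg h]
      simp only [Bool.false_eq_true, false_iff]
      intro hrot
      obtain ⟨⟨p, hip, hpn, _⟩, ⟨q, hjq, hqn, _⟩⟩ := hInv hrot
      omega

-- the invariant holds initially
theorem pvInv_init {a b : List Int} {n : Nat} (ha : a.length = n) (_hb : b.length = n)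
    (hpos : 0 < n) (μ : List Int) (hμmem : μ ∈ pvRots b n) :
    pvInv a b n μ 0 0 := by
  intro hrot
  constructor
  · obtain ⟨s, hsn, hsμ⟩ := List.mem_map.1 hμmem
    have h1 : a ~r b.rotate s := hrot.trans ⟨s, rfl⟩
    obtain ⟨t, ht⟩ := h1
    have h2 : a.rotate (t % n) = μ := by
      rw [← ha, List.rotate_mod, ht, hsμ]
    obtain ⟨p, hpn, hpe⟩ := pvShiftPred hpos (t % n) (Nat.mod_lt _ hpos)
    exact ⟨p, Nat.zero_le p, hpn, by rw [hpe, h2]⟩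
  · obtain ⟨s, hsn, hsμ⟩ := List.mem_map.1 hμmem
    obtain ⟨q, hqn, hqe⟩ := pvShiftPred hpos s (List.mem_range.1 hsn)
    exact ⟨q, Nat.zero_le q, hqn, by rw [hqe, hsμ]⟩

-- B's scan is true iff a ~r b (for equal positive lengths)
theorem pvAlt_iff {a b : List Int} {n : Nat} (ha : a.length = n) (hb : b.length = n)
    (hpos : 0 < n) :
    ((List.range n).any (fun i => b == a.drop i ++ a.take i) = true ↔ a ~r b) := by
  rw [List.any_eq_true]
  constructor
  · rintro ⟨s, hs, hsb⟩
    have hsn : s < n := List.mem_range.1 hs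
    have hr : a.rotate s = b := by
      rw [List.rotate_eq_drop_append_take (by omega)]
      exact (beq_iff_eq.1 hsb).symm
    exact ⟨s, hr⟩
  · rintro ⟨m, hm⟩
    refine ⟨m % n, List.mem_range.2 (Nat.mod_lt _ hpos), beq_iff_eq.2 ?_⟩
    have hr : a.rotate (m % n) = b := by rw [← ha, List.rotate_mod, hm]
    rw [← hr, List.rotate_eq_drop_append_take (by rw [ha]; exact le_of_lt (Nat.mod_lt _ hpos))]

-- ===== VERDICT (by name: the statement is the Claim_ definition above) =====
theorem cyclic_equivalence_spec : Claim_equal_cyclic_equivalence := by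
  intro a b _
  unfold Spec_cyclic_equivalence cyclic_equivalence cyclic_equivalence_alt
  by_cases hlen : a.length ≠ b.length
  · rw [if_pos hlen, if_pos hlen]
  · rw [if_neg hlen, if_neg hlen]
    rw [not_not] at hlen
    by_cases hpos : 0 < a.length
    · have hrotsne : pvRots b a.length ≠ [] := by
        unfold pvRots
        simp only [ne_eq, List.map_eq_nil_iff, List.range_eq_nil]
        omega
      obtain ⟨μ, hμmem, hμle⟩ := pvExistsMin (pvRots b a.length) hrotsne
      have hiff := pvOuter_iff rfl hlen.symm hpos μ hμle
        ((a.length - 0) + (a.length - 0)) 0 0 le_rfl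
        (pvInv_init rfl hlen.symm hpos μ hμmem)
      have halt := pvAlt_iff (a := a) (b := b) rfl hlen.symm hpos
      cases hA : pvOuter a.length a b 0 0
      · cases hB : (List.range a.length).any (fun i => b == a.drop i ++ a.take i)
        · rfl
        · exact absurd (hiff.2 (halt.1 hB)) (by simp [hA])
      · exact (halt.2 (hiff.1 hA)).symm
    · have h0 : a.length = 0 := by omega
      rw [h0, pvOuter, if_neg (by omega)]
      simp
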